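-- pv_equiv track=rewrite | github.com/sanglide/benchmark_community_detection_in_OSS | deep-learning-algo.py | convert_nodeclustering_to_communities
-- ===== SOURCE A (Python) =====
-- def convert_nodeclustering_to_communities(node_clusters):
--     communities=[]
--     for i in range(max(node_clusters.values())+1):
--         c=[]
--         for node, cluster in node_clusters.items():
--             if cluster==i:
--                 c.append(node)
--         communities.append(c)
--     return communities
-- ===== SOURCE B (Python) =====
-- def convert_nodeclustering_to_communities(node_clusters):
--     groups = {}
--     m = None
--     for node, cluster in node_clusters.items():
--         groups.setdefault(cluster, []).append(node)
--         if m is None or cluster > m: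
--             m = cluster
--     return [groups.get(i, []) for i in range(m + 1)]
-- ===== Notes on version B (the rewrite author's own statement) =====
-- stated objective: faster
-- what changed: Instead of re-scanning all dict items once per cluster index (k passes), B makes a single pass that groups nodes into a cluster->list dict with setdefault while tracking the running maximum cluster, then reads the groups out with one comprehension over range(m+1).
import Mathlib
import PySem

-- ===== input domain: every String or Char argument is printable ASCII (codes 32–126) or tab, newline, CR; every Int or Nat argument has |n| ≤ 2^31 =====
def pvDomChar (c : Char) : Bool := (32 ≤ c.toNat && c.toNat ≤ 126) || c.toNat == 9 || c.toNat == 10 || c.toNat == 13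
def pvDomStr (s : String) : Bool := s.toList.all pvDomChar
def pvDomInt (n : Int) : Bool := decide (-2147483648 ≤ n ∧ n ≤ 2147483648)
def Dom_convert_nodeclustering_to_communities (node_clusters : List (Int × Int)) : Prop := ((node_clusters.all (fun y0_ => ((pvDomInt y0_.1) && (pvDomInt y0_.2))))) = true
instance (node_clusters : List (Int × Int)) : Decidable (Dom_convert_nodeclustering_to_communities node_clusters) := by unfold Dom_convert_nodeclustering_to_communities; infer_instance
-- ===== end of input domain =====

-- B replaces A's per-cluster-index rescan of the dict with a single grouping pass
-- (cluster -> list dict built with setdefault, running max tracked alongside) and one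
-- readout comprehension (objective: faster, one pass instead of k passes).

-- ===== PORT A =====
def convert_nodeclustering_to_communities (node_clusters : List (Int × Int)) : List (List Int) :=
  match PySem.List.max? (PySem.Dict.ofList node_clusters).values (fun y => y) with
  | none => []   -- max() of an empty dict raises ValueError in Python: outside Pre_
  | some m =>
    (PySem.List.pyRange 0 (m + 1) 1).foldl
      (fun communities i =>
        communities ++
          [(PySem.Dict.ofList node_clusters).items.foldl
            (fun c p => if p.2 == i then c ++ [p.1] else c) []]) []

-- ===== PORT B =====
def convert_nodeclustering_to_communities_alt (node_clusters : List (Int × Int)) : List (List Int) :=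
  let s := (PySem.Dict.ofList node_clusters).items.foldl
    (fun (s : PySem.Dict Int (List Int) × Option Int) p =>
      (s.1.modify p.2 [] (· ++ [p.1]),      -- groups.setdefault(cluster, []).append(node)
       match s.2 with                        -- if m is None or cluster > m: m = cluster
       | none => some p.2
       | some m => if p.2 > m then some p.2 else some m))
    (PySem.Dict.empty, none)
  match s.2 with
  | none => []   -- m is None: Python raises TypeError on range(None + 1); outside Pre_
  | some m => (PySem.List.pyRange 0 (m + 1) 1).map (fun i => s.1.getD i [])

-- ===== PRECONDITION & SPEC =====
-- Pre_ excludes only the empty dict, on which A raises ValueError (max of an empty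
-- sequence) and B raises TypeError (range(None + 1)).
def Pre_convert_nodeclustering_to_communities (node_clusters : List (Int × Int)) : Prop := node_clusters ≠ []
instance (node_clusters : List (Int × Int)) : Decidable (Pre_convert_nodeclustering_to_communities node_clusters) := by unfold Pre_convert_nodeclustering_to_communities; infer_instance
def pvWitness_convert_nodeclustering_to_communities : (List (Int × Int)) := [(1, 0), (2, 1), (3, 0)]

def Spec_convert_nodeclustering_to_communities (node_clusters : List (Int × Int)) (out : List (List Int)) : Prop := out = convert_nodeclustering_to_communities_alt node_clusters
instance (node_clusters : List (Int × Int)) (out : List (List Int)) : Decidable (Spec_convert_nodeclustering_to_communities node_clusters out) := by unfold Spec_convert_nodeclustering_to_communities; infer_instance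

-- ===== CLAIM (what is proved, stated in full; the proofs are below) =====
def Claim_equal_convert_nodeclustering_to_communities : Prop := ∀ (node_clusters : List (Int × Int)), Dom_convert_nodeclustering_to_communities node_clusters → Pre_convert_nodeclustering_to_communities node_clusters → Spec_convert_nodeclustering_to_communities node_clusters (convert_nodeclustering_to_communities node_clusters)

-- ===== LEMMAS AND PROOFS =====

-- B's running-max loop, started after its first item, is the fold of `max`.
lemma pv_runmax_fold (t : List (Int × Int)) (a : Int) :
    t.foldl (fun (mo : Option Int) p =>
        match mo with
        | none => some p.2
        | some m => if p.2 > m then some p.2 else some m) (some a)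
      = some ((t.map (·.2)).foldl max a) := by
  induction t generalizing a with
  | nil => rfl
  | cons p t ih =>
    by_cases h : p.2 > a
    · simp only [List.foldl_cons, List.map_cons, if_pos h, max_eq_right (le_of_lt h)]
      exact ih p.2
    · simp only [List.foldl_cons, List.map_cons, if_neg h, max_eq_left (le_of_not_gt h)]
      exact ih a

-- B's running max equals A's max() over the dict's values.
lemma pv_runmax_eq_max? (l : List (Int × Int)) :
    l.foldl (fun (mo : Option Int) p =>
        match mo with
        | none => some p.2
        | some m => if p.2 > m then some p.2 else some m) none
      = PySem.List.max? (l.map (·.2)) (fun y => y) := by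
  cases l with
  | nil => rfl
  | cons q t =>
    simp only [List.foldl_cons, List.map_cons, PySem.List.max?_id_cons]
    exact pv_runmax_fold t q.2

-- ===== VERDICT (by name: the statement is the Claim_ definition above) =====
theorem convert_nodeclustering_to_communities_spec : Claim_equal_convert_nodeclustering_to_communities := by
  intro node_clusters _ _
  unfold Spec_convert_nodeclustering_to_communities
  unfold convert_nodeclustering_to_communities convert_nodeclustering_to_communities_alt
  simp only
  rw [PySem.List.foldl_prod_mk
        (f := fun (d : PySem.Dict Int (List Int)) (p : Int × Int) => d.modify p.2 [] (· ++ [p.1]))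
        (g := fun (mo : Option Int) (p : Int × Int) =>
          match mo with
          | none => some p.2
          | some m => if p.2 > m then some p.2 else some m)]
  have hvals : (PySem.Dict.ofList node_clusters).values
      = (PySem.Dict.ofList node_clusters).items.map (·.2) := rfl
  rw [pv_runmax_eq_max?, ← hvals]
  cases PySem.List.max? (PySem.Dict.ofList node_clusters).values (fun y => y) with
  | none => rfl
  | some m =>
    dsimp only
    rw [PySem.List.foldl_append_singleton_eq_map, List.nil_append]
    apply List.map_congr_left
    intro i _
    rw [PySem.List.foldl_append_if (p := fun p : Int × Int => p.2 == i) (f := (·.1)),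
        List.nil_append]
    have hswap : (PySem.Dict.ofList node_clusters).items.foldl
        (fun (d : PySem.Dict Int (List Int)) (p : Int × Int) => d.modify p.2 [] (· ++ [p.1]))
        PySem.Dict.empty
      = ((PySem.Dict.ofList node_clusters).items.map (fun p => (p.2, p.1))).foldl
          (fun (d : PySem.Dict Int (List Int)) q => d.modify q.1 [] (· ++ [q.2]))
          PySem.Dict.empty := by
      rw [List.foldl_map]
    rw [hswap, PySem.Dict.getD_foldl_modify_append, PySem.Dict.getD_empty, List.nil_append,
        List.filter_map, List.map_map]
    rfl
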